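-- pv_equiv track=rewrite | github.com/H-Rusch/AdventOfCode-Python | aoc2021/solutions/day18.py | find_next_part
-- ===== SOURCE A (Python) =====
-- def find_next_part(line: list) -> tuple:
--     """
--     Find top level opening and closing block. Return the indices of where the brackets open and close and where
--     the element is separated.
--     """
--     opening, closing, comma = None, None, None
--     depth = 0
--
--     for i in range(len(line)):
--         if line[i] == "[":
--             if depth == 0:
--                 opening = i
--             depth += 1
--
--         elif line[i] == "]":
--             depth -= 1
--             if depth == 0:
--                 closing = i
--
--         elif line[i] == ",":
--             if depth == 1:
--                 comma = i
--
--     return opening, closing, comma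
-- ===== SOURCE B (Python) =====
-- def _last_index(tagged, sym, level):
--     for i in range(len(tagged) - 1, -1, -1):
--         tok, d = tagged[i]
--         if tok == sym and d == level:
--             return i
--     return None
--
--
-- def find_next_part(line: list) -> tuple:
--     # Build the depth profile: depths[i] = bracket depth just before token i.
--     depths = []
--     d = 0
--     for tok in line:
--         depths.append(d)
--         if tok == "[":
--             d += 1
--         elif tok == "]":
--             d -= 1
--     tagged = list(zip(line, depths))
--     opening = _last_index(tagged, "[", 0)
--     closing = _last_index(tagged, "]", 1)
--     comma = _last_index(tagged, ",", 1)
--     return opening, closing, comma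
-- ===== Notes on version B (the rewrite author's own statement) =====
-- stated objective: alternative
-- what changed: Replaces the single interleaved stateful scan by a materialized depth profile (prefix-sum pass) followed by three independent backward searches, one per result component.
import Mathlib
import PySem

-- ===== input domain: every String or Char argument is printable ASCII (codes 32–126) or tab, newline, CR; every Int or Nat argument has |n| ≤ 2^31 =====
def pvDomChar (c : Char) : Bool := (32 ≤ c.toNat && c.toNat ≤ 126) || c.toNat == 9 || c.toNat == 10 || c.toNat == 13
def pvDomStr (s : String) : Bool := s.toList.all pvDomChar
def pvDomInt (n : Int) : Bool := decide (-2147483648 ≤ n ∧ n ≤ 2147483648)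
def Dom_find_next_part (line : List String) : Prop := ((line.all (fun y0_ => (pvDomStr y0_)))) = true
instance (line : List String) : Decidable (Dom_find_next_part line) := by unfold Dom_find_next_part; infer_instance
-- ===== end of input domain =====

-- B replaces A's single interleaved stateful scan by a materialized depth profile plus
-- three independent backward searches (objective: alternative decomposition, same cost).

-- ===== PORT A =====
-- A's loop body: state (opening, closing, comma, depth), one token (i, line[i]) at a time.
def fnpStepA (st : Option Int × Option Int × Option Int × Int) (p : Int × String) :
    Option Int × Option Int × Option Int × Int :=
  let (o, c, m, d) := st
  let i := p.1
  let tok := p.2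
  if tok == "[" then
    (if d == 0 then some i else o, c, m, d + 1)
  else if tok == "]" then
    let d := d - 1
    (o, if d == 0 then some i else c, m, d)
  else if tok == "," then
    (o, c, if d == 1 then some i else m, d)
  else (o, c, m, d)

def find_next_part (line : List String) : Option Int × Option Int × Option Int :=
  let st := (PySem.List.enumerate line).foldl fnpStepA (none, none, none, 0)
  (st.1, st.2.1, st.2.2.1)

-- ===== PORT B =====
-- depth-profile pass: state (current depth, depths-so-far)
def fnpDepthsF (st : Int × List Int) (tok : String) : Int × List Int :=
  let d := st.1
  let acc := st.2 ++ [d]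
  let d' := if tok == "[" then d + 1 else if tok == "]" then d - 1 else d
  (d', acc)

-- _last_index: scan tagged from the back, first (token, depth) pair matching (sym, level)
def fnpLastIndex (tagged : List (String × Int)) (sym : String) (level : Int) : Option Int :=
  ((PySem.List.enumerate tagged).reverse.find? (fun p => p.2.1 == sym && p.2.2 == level)).map (·.1)

def find_next_part_alt (line : List String) : Option Int × Option Int × Option Int :=
  let depths := (line.foldl fnpDepthsF (0, [])).2
  let tagged := line.zip depths
  (fnpLastIndex tagged "[" 0, fnpLastIndex tagged "]" 1, fnpLastIndex tagged "," 1)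

-- ===== PRECONDITION & SPEC =====
def Spec_find_next_part (line : List String) (out : Option Int × Option Int × Option Int) : Prop := out = find_next_part_alt line
instance (line : List String) (out : Option Int × Option Int × Option Int) : Decidable (Spec_find_next_part line out) := by unfold Spec_find_next_part; infer_instance

-- ===== CLAIM (what is proved, stated in full; the proofs are below) =====
def Claim_equal_find_next_part : Prop := ∀ (line : List String), Dom_find_next_part line → Spec_find_next_part line (find_next_part line)

-- ===== LEMMAS AND PROOFS =====


theorem fnp_depths_length (line : List String) :
    (line.foldl fnpDepthsF (0, [])).2.length = line.length := by
  induction line using List.reverseRecOn with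
  | nil => rfl
  | append_singleton l x ih => simp [List.foldl_append, fnpDepthsF, ih]

theorem fnpLastIndex_append (tagged : List (String × Int)) (x : String) (dl : Int)
    (sym : String) (level : Int) :
    fnpLastIndex (tagged ++ [(x, dl)]) sym level =
      if x == sym && dl == level then some ((tagged.length : Int))
      else fnpLastIndex tagged sym level := by
  unfold fnpLastIndex
  rw [PySem.List.enumerate_append, List.reverse_append]
  simp only [PySem.List.enumerate_cons, PySem.List.enumerate_nil, List.reverse_cons,
    List.reverse_nil, List.nil_append, List.singleton_append, List.find?_cons]
  by_cases h : (x == sym && dl == level) = true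
  · simp [h]
  · simp [h]

theorem fnp_main (line : List String) :
    (PySem.List.enumerate line).foldl fnpStepA (none, none, none, 0) =
      ((find_next_part_alt line).1, (find_next_part_alt line).2.1, (find_next_part_alt line).2.2,
        (line.foldl fnpDepthsF (0, [])).1) := by
  induction line using List.reverseRecOn with
  | nil => decide
  | append_singleton l x ih =>
    have hlen : (l.foldl fnpDepthsF (0, [])).2.length = l.length := fnp_depths_length l
    have hfold : (l ++ [x]).foldl fnpDepthsF (0, []) =
        ((if x == "[" then (l.foldl fnpDepthsF (0, [])).1 + 1
          else if x == "]" then (l.foldl fnpDepthsF (0, [])).1 - 1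
          else (l.foldl fnpDepthsF (0, [])).1),
         (l.foldl fnpDepthsF (0, [])).2 ++ [(l.foldl fnpDepthsF (0, [])).1]) := by
      rw [List.foldl_append]; rfl
    have hzip : (l ++ [x]).zip ((l.foldl fnpDepthsF (0, [])).2 ++ [(l.foldl fnpDepthsF (0, [])).1]) =
        l.zip (l.foldl fnpDepthsF (0, [])).2 ++ [(x, (l.foldl fnpDepthsF (0, [])).1)] := by
      rw [List.zip_append hlen.symm]; rfl
    have hzlen : (l.zip (l.foldl fnpDepthsF (0, [])).2).length = l.length := by
      simp [List.length_zip, hlen]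
    rw [PySem.List.enumerate_append, List.foldl_append, ih]
    simp only [PySem.List.enumerate_cons, PySem.List.enumerate_nil, List.foldl_cons, List.foldl_nil]
    unfold find_next_part_alt
    rw [hfold]
    simp only [hzip, fnpLastIndex_append, hzlen]
    unfold fnpStepA
    by_cases h1 : x == "["
    · have hx : x = "[" := by exact eq_of_beq h1
      subst hx
      simp only [beq_iff_eq]
      by_cases h2 : (l.foldl fnpDepthsF (0, [])).1 = 0 <;> simp [h2]
    · by_cases h3 : x == "]"
      · have hx : x = "]" := by exact eq_of_beq h3
        subst hx
        by_cases h2 : (l.foldl fnpDepthsF (0, [])).1 = 1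
        · simp [h2]
        · have h2' : ¬((l.foldl fnpDepthsF (0, [])).1 - 1 = 0) := by omega
          simp [h2, h2']
      · by_cases h4 : x == ","
        · have hx : x = "," := by exact eq_of_beq h4
          subst hx
          simp only [beq_iff_eq, reduceIte]
          by_cases h2 : (l.foldl fnpDepthsF (0, [])).1 = 1 <;> simp [h2]
        · simp [h1, h3, h4]

-- ===== VERDICT (by name: the statement is the Claim_ definition above) =====
theorem find_next_part_spec : Claim_equal_find_next_part := by
  intro line _
  unfold Spec_find_next_part find_next_part
  rw [fnp_main]
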